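-- pv_equiv track=rewrite | github.com/batu-kargili/umai-service | app/core/agentic_builder.py | _normalize_phase_list
-- ===== SOURCE A (Python) =====
-- PHASE_ORDER = (
--     "PRE_LLM",
--     "POST_LLM",
--     "TOOL_INPUT",
--     "TOOL_OUTPUT",
--     "MCP_REQUEST",
--     "MCP_RESPONSE",
--     "MEMORY_WRITE",
-- )
--
-- PHASE_ALIASES = {
--     "PRE": "PRE_LLM",
--     "PRE_LM": "PRE_LLM",
--     "PRELLM": "PRE_LLM",
--     "BEFORE": "PRE_LLM",
--     "BEFORE_LLM": "PRE_LLM",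
--     "POST": "POST_LLM",
--     "POST_LM": "POST_LLM",
--     "POSTLLM": "POST_LLM",
--     "AFTER": "POST_LLM",
--     "AFTER_LLM": "POST_LLM",
-- }
--
-- def _normalize_phase_value(value: object) -> str | None:
--     if not isinstance(value, str):
--         return None
--     normalized = value.strip().upper().replace("-", "_").replace(" ", "_")
--     if normalized in PHASE_ORDER:
--         return normalized
--     return PHASE_ALIASES.get(normalized)
--
-- def _normalize_phase_list(values: object) -> list[str]:
--     if not isinstance(values, list):
--         return []
--     seen: set[str] = set()
--     phases: list[str] = []
--     for item in values:
--         normalized = _normalize_phase_value(item)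
--         if normalized and normalized not in seen:
--             phases.append(normalized)
--             seen.add(normalized)
--     return [phase for phase in PHASE_ORDER if phase in phases]
-- ===== SOURCE B (Python) =====
-- PHASE_ORDER = (
--     "PRE_LLM",
--     "POST_LLM",
--     "TOOL_INPUT",
--     "TOOL_OUTPUT",
--     "MCP_REQUEST",
--     "MCP_RESPONSE",
--     "MEMORY_WRITE",
-- )
--
-- PHASE_ALIASES = {
--     "PRE": "PRE_LLM",
--     "PRE_LM": "PRE_LLM",
--     "PRELLM": "PRE_LLM",
--     "BEFORE": "PRE_LLM",
--     "BEFORE_LLM": "PRE_LLM",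
--     "POST": "POST_LLM",
--     "POST_LM": "POST_LLM",
--     "POSTLLM": "POST_LLM",
--     "AFTER": "POST_LLM",
--     "AFTER_LLM": "POST_LLM",
-- }
--
-- _PHASE_INDEX = {phase: i for i, phase in enumerate(PHASE_ORDER)}
--
-- def _normalize_phase_value(value):
--     if not isinstance(value, str):
--         return None
--     normalized = value.strip().upper().replace("-", "_").replace(" ", "_")
--     if normalized in PHASE_ORDER:
--         return normalized
--     return PHASE_ALIASES.get(normalized)
--
-- def _normalize_phase_list(values):
--     if not isinstance(values, list):
--         return []
--     valid = set()
--     for item in values: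
--         normalized = _normalize_phase_value(item)
--         if normalized is not None:
--             valid.add(normalized)
--     return sorted(valid, key=_PHASE_INDEX.__getitem__)
-- ===== Notes on version B (the rewrite author's own statement) =====
-- stated objective: simpler
-- what changed: Replaces A's seen-set plus ordered-list accumulation loop and the final membership scan over PHASE_ORDER with collecting the valid normalized phases into a set and sorting it by a precomputed phase-to-index table.
import Mathlib
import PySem

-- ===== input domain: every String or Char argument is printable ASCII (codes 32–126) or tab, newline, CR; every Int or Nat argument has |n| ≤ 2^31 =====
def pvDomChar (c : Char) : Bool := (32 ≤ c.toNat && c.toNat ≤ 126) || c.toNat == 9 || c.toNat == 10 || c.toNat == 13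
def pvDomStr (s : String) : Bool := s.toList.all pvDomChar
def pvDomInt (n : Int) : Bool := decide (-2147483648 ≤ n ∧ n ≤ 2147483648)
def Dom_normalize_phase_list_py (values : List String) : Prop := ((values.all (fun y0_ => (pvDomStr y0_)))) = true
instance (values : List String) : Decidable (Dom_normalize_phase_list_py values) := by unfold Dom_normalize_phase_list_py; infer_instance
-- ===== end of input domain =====

-- B replaces A's seen-set/ordered-list loop plus final PHASE_ORDER membership scan with a
-- set of valid phases sorted by a precomputed phase→index table (objective: simpler).

-- ===== PORT A =====
def PHASE_ORDER_py : List String :=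
  ["PRE_LLM", "POST_LLM", "TOOL_INPUT", "TOOL_OUTPUT", "MCP_REQUEST", "MCP_RESPONSE", "MEMORY_WRITE"]

def PHASE_ALIASES_py : PySem.Dict String String :=
  PySem.Dict.ofList
    [("PRE", "PRE_LLM"), ("PRE_LM", "PRE_LLM"), ("PRELLM", "PRE_LLM"),
     ("BEFORE", "PRE_LLM"), ("BEFORE_LLM", "PRE_LLM"),
     ("POST", "POST_LLM"), ("POST_LM", "POST_LLM"), ("POSTLLM", "POST_LLM"),
     ("AFTER", "POST_LLM"), ("AFTER_LLM", "POST_LLM")]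

-- value.strip().upper().replace("-", "_").replace(" ", "_")
def normCanon (value : String) : String :=
  PySem.Str.replace (PySem.Str.replace (PySem.Str.upper (PySem.Str.strip value)) "-" "_") " " "_"

def normalize_phase_value_py (value : String) : Option String :=
  if normCanon value ∈ PHASE_ORDER_py then some (normCanon value)
  else PySem.Dict.get? PHASE_ALIASES_py (normCanon value)

-- the body of A's loop, applied to the already-computed normalized value
def aApply (st : PySem.Set String × List String) : Option String → PySem.Set String × List String
  | some normalized =>
      -- Python truthiness 'if normalized and normalized not in seen': the None case is the falsy None;
      -- a non-empty string is truthy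
      if normalized ≠ "" ∧ normalized ∉ st.1 then
        (PySem.Set.add st.1 normalized, st.2 ++ [normalized])
      else st
  | none => st

def aStep (st : PySem.Set String × List String) (item : String) : PySem.Set String × List String :=
  aApply st (normalize_phase_value_py item)

def normalize_phase_list_py (values : List String) : List String :=
  let st := values.foldl aStep (PySem.Set.empty, [])
  PHASE_ORDER_py.filter (fun phase => phase ∈ st.2)

-- ===== PORT B =====
def PHASE_INDEX_alt : PySem.Dict String Int :=
  PySem.Dict.ofList
    [("PRE_LLM", 0), ("POST_LLM", 1), ("TOOL_INPUT", 2), ("TOOL_OUTPUT", 3),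
     ("MCP_REQUEST", 4), ("MCP_RESPONSE", 5), ("MEMORY_WRITE", 6)]

def normalize_phase_value_alt (value : String) : Option String :=
  if normCanon value ∈ PHASE_ORDER_py then some (normCanon value)
  else PySem.Dict.get? PHASE_ALIASES_py (normCanon value)

def bApply (valid : PySem.Set String) : Option String → PySem.Set String
  | some normalized => PySem.Set.add valid normalized
  | none => valid

def bStep (valid : PySem.Set String) (item : String) : PySem.Set String :=
  bApply valid (normalize_phase_value_alt item)

def normalize_phase_list_py_alt (values : List String) : List String :=
  let valid : PySem.Set String := values.foldl bStep PySem.Set.empty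
  -- sorted(valid, key=_PHASE_INDEX.__getitem__): the index key is injective on valid phases,
  -- so the result does not depend on Python's set-iteration order
  PySem.List.sorted valid (fun p => PySem.Dict.getD PHASE_INDEX_alt p 0) false

-- ===== PRECONDITION & SPEC =====
def Spec_normalize_phase_list_py (values : List String) (out : List String) : Prop := out = normalize_phase_list_py_alt values
instance (values : List String) (out : List String) : Decidable (Spec_normalize_phase_list_py values out) := by unfold Spec_normalize_phase_list_py; infer_instance

-- ===== CLAIM (what is proved, stated in full; the proofs are below) =====
def Claim_equal_normalize_phase_list_py : Prop := ∀ (values : List String), Dom_normalize_phase_list_py values → Spec_normalize_phase_list_py values (normalize_phase_list_py values)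

-- ===== LEMMAS AND PROOFS =====

-- every alias value lies in PHASE_ORDER
lemma alias_mem_order (n x : String) (h : PHASE_ALIASES_py.get? n = some x) :
    x ∈ PHASE_ORDER_py := by
  have e : PHASE_ALIASES_py = PySem.Dict.mk
    [("PRE", "PRE_LLM"), ("PRE_LM", "PRE_LLM"), ("PRELLM", "PRE_LLM"),
     ("BEFORE", "PRE_LLM"), ("BEFORE_LLM", "PRE_LLM"),
     ("POST", "POST_LLM"), ("POST_LM", "POST_LLM"), ("POSTLLM", "POST_LLM"),
     ("AFTER", "POST_LLM"), ("AFTER_LLM", "POST_LLM")] := by decide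
  rw [e] at h
  simp only [PySem.Dict.get?_mk_cons] at h
  split_ifs at h <;> first
    | (injection h with h; subst h; decide)
    | (simp [PySem.Dict.get?] at h)

-- the normalizer only ever returns phases from PHASE_ORDER
lemma norm_mem_order (v x : String) (h : normalize_phase_value_py v = some x) :
    x ∈ PHASE_ORDER_py := by
  unfold normalize_phase_value_py at h
  by_cases hm : normCanon v ∈ PHASE_ORDER_py
  · rw [if_pos hm] at h
    obtain rfl : normCanon v = x := Option.some.inj h
    exact hm
  · rw [if_neg hm] at h; exact alias_mem_order _ _ h

lemma norm_ne_empty (v x : String) (h : normalize_phase_value_py v = some x) : x ≠ "" := by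
  have hx := norm_mem_order v x h
  simp only [PHASE_ORDER_py, List.mem_cons, List.not_mem_nil, or_false] at hx
  rcases hx with rfl | rfl | rfl | rfl | rfl | rfl | rfl <;> decide

lemma two_norms_eq (v : String) : normalize_phase_value_alt v = normalize_phase_value_py v := rfl

-- membership in A's accumulated phases list
lemma a_fold_mem (values : List String) (seen : PySem.Set String) (phases : List String)
    (hinv : ∀ y, y ∈ seen ↔ y ∈ phases) (x : String) :
    (x ∈ (values.foldl aStep (seen, phases)).2)
    ↔ (x ∈ phases ∨ ∃ v ∈ values, normalize_phase_value_py v = some x) := by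
  induction values generalizing seen phases with
  | nil => simp
  | cons v vs ih =>
    simp only [List.foldl_cons, aStep, List.exists_mem_cons_iff]
    rcases hnv : normalize_phase_value_py v with _ | n <;>
      simp only [aApply, Option.some.injEq]
    · rw [ih seen phases hinv]; simp
    · have hne : n ≠ "" := norm_ne_empty v n hnv
      by_cases hseen : n ∈ seen
      · rw [if_neg (by simp [hseen]), ih seen phases hinv]
        have hnp : n ∈ phases := (hinv n).mp hseen
        constructor
        · rintro (h | h)
          · exact Or.inl h
          · exact Or.inr (Or.inr h)
        · rintro (h | rfl | h)
          · exact Or.inl h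
          · exact Or.inl hnp
          · exact Or.inr h
      · rw [if_pos ⟨hne, hseen⟩,
          ih (PySem.Set.add seen n) (phases ++ [n])
            (fun y => by rw [PySem.Set.mem_add]; simp [hinv y])]
        simp only [List.mem_append, List.mem_singleton]
        constructor
        · rintro ((h | rfl) | h)
          · exact Or.inl h
          · exact Or.inr (Or.inl rfl)
          · exact Or.inr (Or.inr h)
        · rintro (h | rfl | h)
          · exact Or.inl (Or.inl h)
          · exact Or.inl (Or.inr rfl)
          · exact Or.inr h

-- membership in B's set of valid phases
lemma b_fold_mem (values : List String) (valid : PySem.Set String) (x : String) :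
    (x ∈ values.foldl bStep valid)
    ↔ (x ∈ valid ∨ ∃ v ∈ values, normalize_phase_value_py v = some x) := by
  induction values generalizing valid with
  | nil => simp
  | cons v vs ih =>
    simp only [List.foldl_cons, bStep, two_norms_eq, List.exists_mem_cons_iff]
    rcases hnv : normalize_phase_value_py v with _ | n <;>
      simp only [bApply, Option.some.injEq]
    · rw [ih valid]; simp
    · rw [ih (PySem.Set.add valid n)]
      simp only [PySem.Set.mem_add]
      constructor
      · rintro ((h | rfl) | h)
        · exact Or.inl h
        · exact Or.inr (Or.inl rfl)
        · exact Or.inr (Or.inr h)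
      · rintro (h | rfl | h)
        · exact Or.inl (Or.inl h)
        · exact Or.inl (Or.inr rfl)
        · exact Or.inr h

lemma b_fold_nodup (values : List String) (valid : PySem.Set String) (h : valid.Nodup) :
    (values.foldl bStep valid).Nodup := by
  induction values generalizing valid with
  | nil => exact h
  | cons v vs ih =>
    simp only [List.foldl_cons]
    apply ih
    unfold bStep
    cases normalize_phase_value_alt v with
    | none => exact h
    | some n => exact PySem.Set.nodup_add _ _ h

-- ===== VERDICT (by name: the statement is the Claim_ definition above) =====
theorem normalize_phase_list_py_spec : Claim_equal_normalize_phase_list_py := by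
  intro values _
  show normalize_phase_list_py values = normalize_phase_list_py_alt values
  unfold normalize_phase_list_py normalize_phase_list_py_alt
  set phases := (values.foldl aStep (PySem.Set.empty, [])).2 with hph
  set valid := values.foldl bStep PySem.Set.empty with hva
  have hA : ∀ x, x ∈ phases ↔ ∃ v ∈ values, normalize_phase_value_py v = some x := by
    intro x
    rw [hph, a_fold_mem values PySem.Set.empty [] (by simp [PySem.Set.empty])]
    simp
  have hB : ∀ x, x ∈ valid ↔ ∃ v ∈ values, normalize_phase_value_py v = some x := by
    intro x
    rw [hva, b_fold_mem values PySem.Set.empty]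
    simp [PySem.Set.empty]
  have hvn : valid.Nodup := b_fold_nodup values PySem.Set.empty (by simp [PySem.Set.empty])
  have hsub : ∀ x ∈ valid, x ∈ PHASE_ORDER_py := by
    intro x hx
    obtain ⟨v, _, hvx⟩ := (hB x).mp hx
    exact norm_mem_order v x hvx
  -- the sorted set equals PHASE_ORDER filtered by membership in the set
  have hsorted :
      PySem.List.sorted valid (fun p => PySem.Dict.getD PHASE_INDEX_alt p 0) false
        = PHASE_ORDER_py.filter (fun p => p ∈ valid) := by
    apply PySem.List.sorted_eq_of_perm_of_pairwise_lt
    · rw [List.perm_ext_iff_of_nodup (List.Nodup.filter _ (by decide)) hvn]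
      intro a
      simp only [List.mem_filter, decide_eq_true_eq]
      exact ⟨fun h => h.2, fun h => ⟨hsub a h, h⟩⟩
    · exact List.Pairwise.filter _
        (by decide :
          PHASE_ORDER_py.Pairwise
            (fun a b => PySem.Dict.getD PHASE_INDEX_alt a 0 < PySem.Dict.getD PHASE_INDEX_alt b 0))
  rw [hsorted]
  apply List.filter_congr
  intro p _
  simp only [decide_eq_decide]
  rw [hA p, hB p]
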